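-- pv_equiv track=rewrite | github.com/michonchy/dream-flower-API | hello_world/app.py | is_dream_flower
-- ===== SOURCE A (Python) =====
-- def is_dream_flower(n):
--     dream_flower = ""
--     for a in range(n):
--         music = ""
--         for i in range (13):
--             if i <= 8:
--                 music += "とんで"
--             elif 8 < i <= 11:
--                 music += "まわって"
--             else:
--                 music += "まわる"
--         dream_flower += music + "\n"
--     return dream_flower
-- ===== SOURCE B (Python) =====
-- def is_dream_flower(n):
--     line = "とんで" * 9 + "まわって" * 3 + "まわる"
--     return (line + "\n") * n
-- ===== Notes on version B (the rewrite author's own statement) =====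
-- stated objective: simpler
-- what changed: Replaces the nested loops (n iterations, each rebuilding the 13-step line character by character) with a closed form: the constant line is written once via string multiplication and repeated n times by string multiplication; no loops remain.
import Mathlib
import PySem

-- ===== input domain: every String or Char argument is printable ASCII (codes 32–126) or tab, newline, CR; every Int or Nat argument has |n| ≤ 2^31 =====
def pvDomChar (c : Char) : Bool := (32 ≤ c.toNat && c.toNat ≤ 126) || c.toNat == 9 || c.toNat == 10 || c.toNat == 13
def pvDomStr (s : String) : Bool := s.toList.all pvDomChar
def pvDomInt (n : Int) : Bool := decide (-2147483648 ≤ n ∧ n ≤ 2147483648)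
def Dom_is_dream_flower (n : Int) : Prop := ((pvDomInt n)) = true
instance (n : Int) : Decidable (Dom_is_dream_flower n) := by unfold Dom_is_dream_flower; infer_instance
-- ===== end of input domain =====

set_option maxRecDepth 100000


-- B replaces A's nested loops with a closed form (the constant line written once, repeated by string multiplication); objective: simpler.

-- ===== PORT A =====
def is_dream_flower (n : Int) : String :=
  (PySem.List.pyRange 0 n 1).foldl (fun dream_flower _a =>
    let music := (PySem.List.pyRange 0 13 1).foldl (fun music i =>
      if i ≤ 8 then music ++ "とんで"
      else if 8 < i ∧ i ≤ 11 then music ++ "まわって"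
      else music ++ "まわる") ""
    dream_flower ++ (music ++ "\n")) ""

-- ===== PORT B =====
-- Python's 's * k' (string repetition) is ported by hand as pyRepeat on the character list: exact,
-- including the empty result for k ≤ 0.
def is_dream_flower_alt (n : Int) : String :=
  let line := String.ofList (PySem.List.pyRepeat "とんで".toList 9) ++
              String.ofList (PySem.List.pyRepeat "まわって".toList 3) ++ "まわる"
  String.ofList (PySem.List.pyRepeat (line ++ "\n").toList n)

-- ===== PRECONDITION & SPEC =====
def Spec_is_dream_flower (n : Int) (out : String) : Prop := out = is_dream_flower_alt n
instance (n : Int) (out : String) : Decidable (Spec_is_dream_flower n out) := by unfold Spec_is_dream_flower; infer_instance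

-- ===== CLAIM (what is proved, stated in full; the proofs are below) =====
def Claim_equal_is_dream_flower : Prop := ∀ (n : Int), Dom_is_dream_flower n → Spec_is_dream_flower n (is_dream_flower n)

-- ===== LEMMAS AND PROOFS =====

-- the constant line (with newline) that both programs emit per iteration
def pvC : String := "とんでとんでとんでとんでとんでとんでとんでとんでとんでまわってまわってまわってまわる\n"

def pvRep : Nat → String
  | 0 => ""
  | m + 1 => pvC ++ pvRep m

theorem pvInner_eq :
    ((PySem.List.pyRange 0 13 1).foldl (fun music i =>
      if i ≤ 8 then music ++ "とんで"
      else if 8 < i ∧ i ≤ 11 then music ++ "まわって"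
      else music ++ "まわる") "") ++ "\n" = pvC := by decide

theorem pvFoldl_const (l : List Int) (s : String) :
    l.foldl (fun acc (_ : Int) => acc ++ pvC) s = s ++ pvRep l.length := by
  induction l generalizing s with
  | nil => simp [pvRep]
  | cons x t ih =>
    have comm : ∀ m, pvC ++ pvRep m = pvRep m ++ pvC := by
      intro m
      induction m with
      | zero => simp [pvRep]
      | succ k ihk =>
        simp only [pvRep]
        rw [ihk, ← String.append_assoc, ihk]
    simp [List.foldl, ih, pvRep, String.append_assoc, comm t.length]

theorem pvA_eq (n : Int) : is_dream_flower n = pvRep n.toNat := by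
  unfold is_dream_flower
  have step :
      (fun (dream_flower : String) (_a : Int) =>
        let music := (PySem.List.pyRange 0 13 1).foldl (fun music i =>
          if i ≤ 8 then music ++ "とんで"
          else if 8 < i ∧ i ≤ 11 then music ++ "まわって"
          else music ++ "まわる") ""
        dream_flower ++ (music ++ "\n")) =
      (fun acc (_ : Int) => acc ++ pvC) := by
    funext s a
    simp only [← pvInner_eq]
  rw [step, pvFoldl_const, PySem.List.length_pyRange_one]
  simp

theorem pvRepeat_eq (m : Nat) :
    String.ofList (PySem.List.pyRepeat pvC.toList (m : Int)) = pvRep m := by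
  have h : PySem.List.pyRepeat pvC.toList (m : Int) = (List.replicate m pvC.toList).flatten := by
    simp [PySem.List.pyRepeat]
  rw [h]; clear h
  induction m with
  | zero => simp [pvRep]
  | succ k ih => simp only [List.replicate_succ, List.flatten_cons, String.ofList_append, ih, pvRep, String.ofList_toList]

theorem pvB_eq (n : Int) : is_dream_flower_alt n = pvRep n.toNat := by
  unfold is_dream_flower_alt
  have hline :
      ((String.ofList (PySem.List.pyRepeat "とんで".toList 9) ++
        String.ofList (PySem.List.pyRepeat "まわって".toList 3) ++ "まわる") ++ "\n") = pvC := by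
    decide
  simp only [hline]
  rcases le_or_gt n 0 with h | h
  · have : n.toNat = 0 := Int.toNat_of_nonpos h
    rw [this]
    have : PySem.List.pyRepeat pvC.toList n = [] := by
      simp [PySem.List.pyRepeat, Int.toNat_of_nonpos h]
    simp [this, pvRep]
  · lift n to Nat using le_of_lt h
    rw [pvRepeat_eq, Int.toNat_natCast]

-- ===== VERDICT (by name: the statement is the Claim_ definition above) =====
theorem is_dream_flower_spec : Claim_equal_is_dream_flower := by
  intro n _
  unfold Spec_is_dream_flower
  rw [pvA_eq, pvB_eq]
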